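-- pv_equiv track=rewrite | github.com/linhdvu14/cp-sols | sols/Google/CodeJam/2022/2022_0/C_d1000000.py | solve
-- ===== SOURCE A (Python) =====
-- def solve(N, A):
--     A.sort()
--     res = h = 0
--     for a in A:
--         h += 1
--         if h > a: h = a
--         res = max(res, h)
--     return res
-- ===== SOURCE B (Python) =====
-- def solve(N, A):
--     A.sort()
--     n = len(A)
--     return max(0, min([n] + [a + (n - 1 - i) for i, a in enumerate(A)]))
-- ===== Notes on version B (the rewrite author's own statement) =====
-- stated objective: simpler
-- what changed: Replaces A's incremental (res,h) greedy state-machine loop with the closed form max(0, min([n] + [a + (n-1-i) for i,a in enumerate(sorted A)])), a single min-reduction over the transformed sorted values.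
import Mathlib
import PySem

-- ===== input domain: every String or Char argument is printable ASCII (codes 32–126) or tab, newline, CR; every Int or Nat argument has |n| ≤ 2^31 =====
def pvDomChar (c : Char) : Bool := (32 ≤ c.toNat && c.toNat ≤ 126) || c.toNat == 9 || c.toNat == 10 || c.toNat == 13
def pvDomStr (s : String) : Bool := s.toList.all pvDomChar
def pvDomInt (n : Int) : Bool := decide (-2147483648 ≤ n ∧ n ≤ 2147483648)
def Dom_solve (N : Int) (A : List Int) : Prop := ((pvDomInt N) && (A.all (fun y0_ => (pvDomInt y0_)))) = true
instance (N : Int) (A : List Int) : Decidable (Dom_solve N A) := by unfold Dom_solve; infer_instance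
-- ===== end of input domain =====

-- B replaces A's incremental height-tracking loop by the closed form
-- max(0, min([n] + [a + (n-1-i)])) over the sorted list (objective: simpler).
-- Both Pythons sort A in place; the theorems here are about the return value.

-- ===== PORT A =====
-- the greedy loop of A: state (res, h), updated per element in order
def solveLoop : List Int → Int × Int → Int × Int
  | [], st => st
  | a :: t, (res, h) =>
      let h1 := h + 1
      let h2 := if h1 > a then a else h1
      solveLoop t (max res h2, h2)

def solve (N : Int) (A : List Int) : Int :=
  (solveLoop (PySem.List.sorted A (fun x => x) false) (0, 0)).1

-- ===== PORT B =====
def solve_alt (N : Int) (A : List Int) : Int :=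
  -- Source B: A.sort(); n = len(A); max(0, min([n] + [a + (n-1-i) for i,a in enumerate(A)]))
  max 0 (((PySem.List.enumerate (PySem.List.sorted A (fun x => x) false)).map
      (fun p => p.2 + (((PySem.List.sorted A (fun x => x) false).length : Int) - 1 - p.1))).foldl
    min ((PySem.List.sorted A (fun x => x) false).length : Int))

-- ===== PRECONDITION & SPEC =====
def Spec_solve (N : Int) (A : List Int) (out : Int) : Prop := out = solve_alt N A
instance (N : Int) (A : List Int) (out : Int) : Decidable (Spec_solve N A out) := by unfold Spec_solve; infer_instance

-- ===== CLAIM (what is proved, stated in full; the proofs are below) =====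
def Claim_equal_solve : Prop := ∀ (N : Int) (A : List Int), Dom_solve N A → Spec_solve N A (solve N A)

-- ===== LEMMAS AND PROOFS =====

-- reference form: running min of (element + length of the rest after it), seeded with c
def tailMin : List Int → Int → Int
  | [], c => c
  | a :: t, c => tailMin t (min c (a + t.length))

-- the h-component of A's loop, in isolation
def hFin : List Int → Int → Int
  | [], h => h
  | a :: t, h => hFin t (min (h + 1) a)

theorem hFin_eq_tailMin (L : List Int) (h : Int) :
    hFin L h = tailMin L (h + L.length) := by
  induction L generalizing h with
  | nil => simp [hFin, tailMin]
  | cons a t ih =>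
      simp only [hFin, tailMin, ih]
      congr 1
      simp only [List.length_cons]
      push_cast
      omega

theorem le_tailMin (L : List Int) (c m : Int) (hm : m ≤ c) (hL : ∀ x ∈ L, m ≤ x) :
    m ≤ tailMin L c := by
  induction L generalizing c with
  | nil => simpa [tailMin] using hm
  | cons a t ih =>
      have ha : m ≤ a := hL a (by simp)
      have h0 : (0 : Int) ≤ (t.length : Int) := Int.natCast_nonneg _
      exact ih _ (le_min hm (by omega)) (fun x hx => hL x (by simp [hx]))

-- res-component of A's loop on a sorted list: max of the seed res and the final h
theorem solveLoop_fst (L : List Int) (res h : Int) (hres : h ≤ res)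
    (hsort : L.Pairwise (· ≤ ·)) :
    (solveLoop L (res, h)).1 = max res (hFin L h) := by
  induction L generalizing res h with
  | nil => simp [solveLoop, hFin, max_eq_left hres]
  | cons a t ih =>
      rcases List.pairwise_cons.mp hsort with ⟨hhead, htail⟩
      simp only [solveLoop, hFin]
      have hmin : (if h + 1 > a then a else h + 1) = min (h + 1) a := by
        by_cases hc : h + 1 > a
        · simp [hc, min_eq_right (le_of_lt hc)]
        · simp [hc, min_eq_left (le_of_not_gt hc)]
      rw [hmin, ih (max res (min (h + 1) a)) (min (h + 1) a) (le_max_right _ _) htail]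
      rw [max_assoc]
      congr 1
      -- max (min (h+1) a) (hFin t (min (h+1) a)) = hFin t (min (h+1) a)
      have hle : min (h + 1) a ≤ hFin t (min (h + 1) a) := by
        rw [hFin_eq_tailMin]
        refine le_tailMin _ _ _ ?_ ?_
        · have : (0 : Int) ≤ (t.length : Int) := Int.natCast_nonneg _
          omega
        · exact fun x hx => le_trans (min_le_right _ _) (hhead x hx)
      exact max_eq_right hle

-- B's fold equals tailMin when the offset base n matches k + |L|
theorem foldl_enum_eq_tailMin (L : List Int) (k : Int) (n : Int) (c : Int)
    (hn : n = k + L.length) :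
    ((PySem.List.enumerate L k).map (fun p => p.2 + (n - 1 - p.1))).foldl min c
      = tailMin L c := by
  induction L generalizing k c with
  | nil => simp [PySem.List.enumerate_nil, tailMin]
  | cons a t ih =>
      rw [PySem.List.enumerate_cons]
      simp only [List.map_cons, List.foldl_cons, tailMin]
      rw [ih (k + 1) _ (by simp at hn ⊢; push_cast; omega)]
      congr 2
      have : (n : Int) - 1 - k = t.length := by simp at hn; omega
      omega

-- ===== VERDICT (by name: the statement is the Claim_ definition above) =====
theorem solve_spec : Claim_equal_solve := by
  intro N A _
  show solve N A = solve_alt N A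
  unfold solve solve_alt
  set S := PySem.List.sorted A (fun x => x) false with hS
  have hsort : S.Pairwise (· ≤ ·) := by
    simpa using PySem.List.sorted_pairwise (xs := A) (key := fun x => x)
  rw [solveLoop_fst S 0 0 le_rfl hsort]
  rw [foldl_enum_eq_tailMin S 0 (S.length : Int) (S.length : Int) (by simp)]
  rw [hFin_eq_tailMin]
  simp
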